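-- pv_equiv track=rewrite | github.com/brmaciel/GeneticAlgorithm | Example_BinaryEncoding.py | funcaoAdaptacao
-- ===== SOURCE A (Python) =====
-- def funcaoAdaptacao(x):
--     pesoLimite = 15
--     pontos = [10, 20, 15, 2, 30, 10, 30]
--     peso = [1, 5, 10, 1, 7, 5, 1]
--     pesoTotal = pontosTotal = 0
--
--     for i, j, k in zip(pontos, peso, x):
--         pesoTotal += k * j
--         pontosTotal += k * i
--
--     if pesoTotal > pesoLimite:
--         return 0
--     else:
--         return pontosTotal
-- ===== SOURCE B (Python) =====
-- def funcaoAdaptacao(x):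
--     # table of (pontos_i, peso_i) items; two staged recursive dot products,
--     # the points pass only runs when the weight limit is respected
--     itens = [(10, 1), (20, 5), (15, 10), (2, 1), (30, 7), (10, 5), (30, 1)]
--
--     def dot(vals, genes):
--         if not vals or not genes:
--             return 0
--         return genes[0] * vals[0] + dot(vals[1:], genes[1:])
--
--     if dot([w for _, w in itens], x) > 15:
--         return 0
--     return dot([p for p, _ in itens], x)
-- ===== Notes on version B (the rewrite author's own statement) =====
-- stated objective: alternative
-- what changed: Replaces A's single iterative zip loop that accumulates weight and points together with a table of (points, weight) items and a recursive dot-product helper applied in two staged passes: the weight dot product is tested against the limit first and returns 0 early, and only then a second recursive pass computes the points.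
import Mathlib
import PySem

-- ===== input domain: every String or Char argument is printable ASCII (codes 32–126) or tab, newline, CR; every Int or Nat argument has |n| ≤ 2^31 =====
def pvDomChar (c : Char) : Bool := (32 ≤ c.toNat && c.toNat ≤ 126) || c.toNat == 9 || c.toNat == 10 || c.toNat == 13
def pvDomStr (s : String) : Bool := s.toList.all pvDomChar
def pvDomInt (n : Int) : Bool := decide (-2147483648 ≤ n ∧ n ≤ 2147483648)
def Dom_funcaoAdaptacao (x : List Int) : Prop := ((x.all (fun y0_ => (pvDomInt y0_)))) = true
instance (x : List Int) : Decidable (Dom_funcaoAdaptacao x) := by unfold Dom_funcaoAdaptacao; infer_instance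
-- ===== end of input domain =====

-- B replaces A's single combined zip loop by an item table and a recursive dot-product
-- helper used in two staged passes with an early return (objective: alternative decomposition).

-- ===== PORT A =====
-- A: one loop over zip(pontos, peso, x) accumulating (pesoTotal, pontosTotal), then the limit test.
def funcaoAdaptacao (x : List Int) : Int :=
  let pesoLimite : Int := 15
  let pontos : List Int := [10, 20, 15, 2, 30, 10, 30]
  let peso : List Int := [1, 5, 10, 1, 7, 5, 1]
  let acc :=
    ((pontos.zip peso).zip x).foldl
      (fun (st : Int × Int) (t : (Int × Int) × Int) =>
        (st.1 + t.2 * t.1.2, st.2 + t.2 * t.1.1)) (0, 0)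
  if acc.1 > pesoLimite then 0 else acc.2

-- ===== PORT B =====
-- B's helper: recursive dot product consuming both lists head-first (Source B's `dot`).
def pvDot : List Int → List Int → Int
  | [], _ => 0
  | _ :: _, [] => 0
  | v :: vs, g :: gs => g * v + pvDot vs gs

-- B: item table, weight pass gated by early return, then a separate points pass.
def funcaoAdaptacao_alt (x : List Int) : Int :=
  let itens : List (Int × Int) := [(10, 1), (20, 5), (15, 10), (2, 1), (30, 7), (10, 5), (30, 1)]
  if pvDot (itens.map (fun t => t.2)) x > 15 then 0
  else pvDot (itens.map (fun t => t.1)) x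

-- ===== PRECONDITION & SPEC =====
def Spec_funcaoAdaptacao (x : List Int) (out : Int) : Prop := out = funcaoAdaptacao_alt x
instance (x : List Int) (out : Int) : Decidable (Spec_funcaoAdaptacao x out) := by unfold Spec_funcaoAdaptacao; infer_instance

-- ===== CLAIM (what is proved, stated in full; the proofs are below) =====
def Claim_equal_funcaoAdaptacao : Prop := ∀ (x : List Int), Dom_funcaoAdaptacao x → Spec_funcaoAdaptacao x (funcaoAdaptacao x)

-- ===== LEMMAS AND PROOFS =====
-- A's combined fold equals the pair of B's two recursive dot products, provided the
-- two constant lists have equal length (so the three-way zip truncates like each dot).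
theorem pv_fold_eq (ps ws : List Int) :
    ∀ (x : List Int) (a b : Int), ps.length = ws.length →
    ((ps.zip ws).zip x).foldl
      (fun (st : Int × Int) (t : (Int × Int) × Int) =>
        (st.1 + t.2 * t.1.2, st.2 + t.2 * t.1.1)) (a, b)
    = (a + pvDot ws x, b + pvDot ps x) := by
  induction ps generalizing ws with
  | nil =>
    intro x a b h
    cases ws with
    | nil => simp [pvDot]
    | cons w ws => simp at h
  | cons p ps ih =>
    intro x a b h
    cases ws with
    | nil => simp at h
    | cons w ws =>
      cases x with
      | nil => simp [pvDot]
      | cons y ys =>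
        simp only [List.zip_cons_cons, List.foldl_cons, pvDot]
        rw [ih ws ys (a + y * w) (b + y * p) (by simpa using h)]
        rw [Prod.mk.injEq]; constructor <;> ring

theorem funcaoAdaptacao_eq_alt (x : List Int) : funcaoAdaptacao x = funcaoAdaptacao_alt x := by
  show (if (((([(10:Int), 20, 15, 2, 30, 10, 30].zip [(1:Int), 5, 10, 1, 7, 5, 1]).zip x).foldl
      (fun (st : Int × Int) (t : (Int × Int) × Int) =>
        (st.1 + t.2 * t.1.2, st.2 + t.2 * t.1.1)) (0, 0)).1 > 15) then 0
    else ((([(10:Int), 20, 15, 2, 30, 10, 30].zip [(1:Int), 5, 10, 1, 7, 5, 1]).zip x).foldl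
      (fun (st : Int × Int) (t : (Int × Int) × Int) =>
        (st.1 + t.2 * t.1.2, st.2 + t.2 * t.1.1)) (0, 0)).2) = _
  rw [pv_fold_eq [10, 20, 15, 2, 30, 10, 30] [1, 5, 10, 1, 7, 5, 1] x 0 0 rfl]
  simp [funcaoAdaptacao_alt, List.map]

-- ===== VERDICT (by name: the statement is the Claim_ definition above) =====
theorem funcaoAdaptacao_spec : Claim_equal_funcaoAdaptacao := by
  intro x _
  unfold Spec_funcaoAdaptacao
  exact funcaoAdaptacao_eq_alt x
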